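-- pv_equiv track=rewrite | github.com/peshev/picoctf2022 | Forensics/Torrent Analyze/solution.py | parse_tshark_bt_dht_output
-- ===== SOURCE A (Python) =====
-- def parse_tshark_bt_dht_output(tshark_output):
--     """
--     Parsing the output of tshark properly is quite a chore, since it generates JSON with duplicate keys
--     Also, the bt_dht dissector outputs the structure in an appalingly poor way
--     So, we don't bother actually parsing the JSON
--     """
--     info_hash = False
--     for line in tshark_output.split("\n"):
--         if "info_hash" in line:
--             info_hash = True
--         elif info_hash:
--             yield line.split(":")[1].strip().strip('"')
--             info_hash = False
-- ===== SOURCE B (Python) =====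
-- def parse_tshark_bt_dht_output(tshark_output):
--     lines = tshark_output.split("\n")
--     return [cur.split(":")[1].strip().strip('"')
--             for prev, cur in zip(lines, lines[1:])
--             if "info_hash" in prev and "info_hash" not in cur]
-- ===== Notes on version B (the rewrite author's own statement) =====
-- stated objective: simpler
-- what changed: Replaces the mutable boolean-flag state machine (a generator) with a stateless single comprehension over consecutive line pairs zip(lines, lines[1:]): yield cur exactly when the previous line contains info_hash and the current one does not.
import Mathlib
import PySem

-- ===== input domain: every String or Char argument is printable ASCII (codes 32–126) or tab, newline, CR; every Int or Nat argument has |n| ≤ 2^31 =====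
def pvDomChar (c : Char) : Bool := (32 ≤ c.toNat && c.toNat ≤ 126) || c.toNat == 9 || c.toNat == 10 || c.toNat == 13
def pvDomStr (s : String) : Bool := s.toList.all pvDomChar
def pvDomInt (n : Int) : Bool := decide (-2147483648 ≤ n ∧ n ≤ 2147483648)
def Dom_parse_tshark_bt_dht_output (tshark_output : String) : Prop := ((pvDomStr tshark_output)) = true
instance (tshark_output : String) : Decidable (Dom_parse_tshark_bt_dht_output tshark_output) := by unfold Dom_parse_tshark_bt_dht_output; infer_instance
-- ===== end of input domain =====

-- B replaces A's mutable boolean-flag state machine with a stateless comprehension over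
-- consecutive line pairs (simpler); equivalence of return values is proved on Pre_ below.
-- (Python A is a generator; the equivalence is about the sequence of yielded values.)

-- ===== PORT A =====
-- shared value-extraction expression: line.split(":")[1].strip().strip('"')
def pvExtract (line : String) : String :=
  PySem.Str.stripChars (PySem.Str.strip ((PySem.List.pyGet? ((PySem.Str.split? line ":").getD []) 1).getD "")) "\""

-- "info_hash" in line
def pvHasIH (line : String) : Bool := PySem.Str.isIn "info_hash" line

def parse_tshark_bt_dht_output (tshark_output : String) : List String :=
  (((PySem.Str.split? tshark_output "\n").getD []).foldl
    (fun (st : Bool × List String) line =>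
      if pvHasIH line then (true, st.2)
      else if st.1 then (false, st.2 ++ [pvExtract line])
      else st)
    (false, [])).2

-- ===== PORT B =====
def parse_tshark_bt_dht_output_alt (tshark_output : String) : List String :=
  let lines := (PySem.Str.split? tshark_output "\n").getD []
  (List.zip lines (lines.drop 1)).filterMap
    (fun pc => if pvHasIH pc.1 && !pvHasIH pc.2 then some (pvExtract pc.2) else none)

-- ===== PRECONDITION & SPEC =====
-- Pre_ excludes exactly the inputs on which Python A raises IndexError: a line that gets
-- yielded (previous line contains "info_hash", this one does not) but contains no ":".
def Pre_parse_tshark_bt_dht_output (tshark_output : String) : Prop :=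
  ∀ pc ∈ List.zip ((PySem.Str.split? tshark_output "\n").getD [])
                  (((PySem.Str.split? tshark_output "\n").getD []).tail),
    pvHasIH pc.1 = true → pvHasIH pc.2 = false → PySem.Str.isIn ":" pc.2 = true
instance (tshark_output : String) : Decidable (Pre_parse_tshark_bt_dht_output tshark_output) := by
  unfold Pre_parse_tshark_bt_dht_output; infer_instance

def pvWitness_parse_tshark_bt_dht_output : String := "info_hash\nid: \"abcd\"\nmore"

def Spec_parse_tshark_bt_dht_output (tshark_output : String) (out : List String) : Prop := out = parse_tshark_bt_dht_output_alt tshark_output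
instance (tshark_output : String) (out : List String) : Decidable (Spec_parse_tshark_bt_dht_output tshark_output out) := by unfold Spec_parse_tshark_bt_dht_output; infer_instance

-- ===== CLAIM (what is proved, stated in full; the proofs are below) =====
def Claim_equal_parse_tshark_bt_dht_output : Prop := ∀ (tshark_output : String), Dom_parse_tshark_bt_dht_output tshark_output → Pre_parse_tshark_bt_dht_output tshark_output → Spec_parse_tshark_bt_dht_output tshark_output (parse_tshark_bt_dht_output tshark_output)

-- ===== LEMMAS AND PROOFS =====

-- the values A yields while scanning the remaining lines with flag f
def pvGo (f : Bool) : List String → List String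
  | [] => []
  | c :: t =>
    if pvHasIH c then pvGo true t
    else if f then pvExtract c :: pvGo false t
    else pvGo false t

theorem pvFold_eq_go (ls : List String) : ∀ (f : Bool) (acc : List String),
    (ls.foldl
      (fun (st : Bool × List String) line =>
        if pvHasIH line then (true, st.2)
        else if st.1 then (false, st.2 ++ [pvExtract line])
        else st)
      (f, acc)).2 = acc ++ pvGo f ls := by
  induction ls with
  | nil => intro f acc; simp [pvGo]
  | cons c t ih =>
    intro f acc
    by_cases h : pvHasIH c = true
    · simp [List.foldl, h, pvGo, ih]
    · cases f with
      | false => simp [List.foldl, h, pvGo, ih]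
      | true => simp [List.foldl, h, pvGo, ih]

theorem pvGo_eq_zip (ls : List String) : ∀ (prev : String),
    pvGo (pvHasIH prev) ls =
      (List.zip (prev :: ls) ls).filterMap
        (fun pc => if pvHasIH pc.1 && !pvHasIH pc.2 then some (pvExtract pc.2) else none) := by
  induction ls with
  | nil => intro prev; simp [pvGo]
  | cons c t ih =>
    intro prev
    have ihc := ih c
    rw [List.zip_cons_cons, List.filterMap_cons]
    cases h : pvHasIH c with
    | true =>
      rw [h] at ihc
      cases hp : pvHasIH prev with
      | false => simp [pvGo, h, ihc]
      | true => simp [pvGo, h, ihc]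
    | false =>
      rw [h] at ihc
      cases hp : pvHasIH prev with
      | false => simp [pvGo, h, ihc]
      | true => simp [pvGo, h, ihc]

theorem pvGo_false (ls : List String) : ∀ (l0 : String),
    pvGo false (l0 :: ls) = pvGo (pvHasIH l0) ls := by
  intro l0
  by_cases h : pvHasIH l0 = true
  · simp [pvGo, h]
  · have h' : pvHasIH l0 = false := by simpa using h
    simp [pvGo, h']

-- ===== VERDICT (by name: the statement is the Claim_ definition above) =====
theorem parse_tshark_bt_dht_output_spec : Claim_equal_parse_tshark_bt_dht_output := by
  intro s _ _
  unfold Spec_parse_tshark_bt_dht_output parse_tshark_bt_dht_output parse_tshark_bt_dht_output_alt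
  cases hl : (PySem.Str.split? s "\n").getD [] with
  | nil => simp
  | cons l0 rest =>
    rw [pvFold_eq_go]
    simp only [List.nil_append, List.drop_succ_cons, List.drop_zero]
    rw [pvGo_false, pvGo_eq_zip]
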